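-- pv_equiv track=rewrite | github.com/qinx18/compiler-guided-triton-gen | analysis/legacy/compute_war_dependences.py | _tokenize_isl_schedule
-- ===== SOURCE A (Python) =====
-- def _tokenize_isl_schedule(s):
--     """Tokenize an ISL schedule string into a list of tokens.
--
--     Token types: '{', '}', '[', ']', ':', ',', quoted strings ("..."), identifiers.
--     Inside quoted strings, all characters (including braces/brackets) are literal.
--     """
--     tokens = []
--     i = 0
--     while i < len(s):
--         c = s[i]
--         if c in ' \t\n\r':
--             i += 1
--             continue
--         if c in '{}[]:,':
--             tokens.append(c)
--             i += 1
--             continue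
--         if c == '"':
--             j = i + 1
--             while j < len(s) and s[j] != '"':
--                 j += 1
--             tokens.append(s[i:j + 1])  # include quotes
--             i = j + 1
--             continue
--         # Identifier (key names like domain, child, sequence, filter, schedule, set)
--         j = i
--         while j < len(s) and s[j] not in ' \t\n\r{}[]:,"':
--             j += 1
--         tokens.append(s[i:j])
--         i = j
--     return tokens
-- ===== SOURCE B (Python) =====
-- def _tokenize_isl_schedule(s):
--     """Single forward pass over the characters with a small state machine:
--     an identifier buffer and an optional quote buffer replace A's index
--     arithmetic and inner scanning loops."""
--     tokens = []
--     ident = []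
--     quote = None  # None, or list of chars of the quoted token so far (with opening '"')
--     for c in s:
--         if quote is not None:
--             quote.append(c)
--             if c == '"':
--                 tokens.append(''.join(quote))
--                 quote = None
--             continue
--         if c in ' \t\n\r{}[]:,"':
--             if ident:
--                 tokens.append(''.join(ident))
--                 ident = []
--             if c in '{}[]:,':
--                 tokens.append(c)
--             elif c == '"':
--                 quote = ['"']
--         else:
--             ident.append(c)
--     if ident:
--         tokens.append(''.join(ident))
--     elif quote is not None:
--         tokens.append(''.join(quote))
--     return tokens
-- ===== Notes on version B (the rewrite author's own statement) =====
-- stated objective: alternative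
-- what changed: Replaced A's index-based outer loop with inner while-scans and slicing by a single forward pass over the characters maintaining an identifier buffer and an optional quote buffer (a small state machine); no index arithmetic or slicing remains.
import Mathlib
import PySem

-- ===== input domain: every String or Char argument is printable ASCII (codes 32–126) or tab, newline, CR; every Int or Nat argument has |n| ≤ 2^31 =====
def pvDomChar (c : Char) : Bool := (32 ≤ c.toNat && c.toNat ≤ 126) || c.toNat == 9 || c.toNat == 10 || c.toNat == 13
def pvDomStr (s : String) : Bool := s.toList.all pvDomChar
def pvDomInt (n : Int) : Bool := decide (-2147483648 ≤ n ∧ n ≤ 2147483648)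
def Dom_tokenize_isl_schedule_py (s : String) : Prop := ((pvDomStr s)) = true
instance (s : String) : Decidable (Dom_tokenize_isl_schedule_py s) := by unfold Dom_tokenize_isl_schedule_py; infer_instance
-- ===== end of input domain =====

-- B keeps a running identifier/quote buffer in one pass instead of A's index loop with inner scans.
-- Shared character classes, exactly the literal sets the Python sources test membership in.
def isWsChar (c : Char) : Bool := c = ' ' || c = '\t' || c = '\n' || c = '\r'      -- c in ' \t\n\r'
def isPunctChar (c : Char) : Bool := c = '{' || c = '}' || c = '[' || c = ']' || c = ':' || c = ','  -- c in '{}[]:,'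
def isDelimChar (c : Char) : Bool := isWsChar c || isPunctChar c || c = '"'        -- c in ' \t\n\r{}[]:,"'

-- ===== PORT A =====
-- A's inner quote scan: advance j while s[j] ≠ '"'; the returned prefix is s[i+1:j+1]
-- (closing quote included when found, whole remainder when not), paired with the rest s[j+1:].
def scanQuoteA : List Char → List Char × List Char
  | [] => ([], [])
  | c :: r => if c = '"' then (['"'], r) else
      let p := scanQuoteA r
      (c :: p.1, p.2)

theorem scanQuoteA_snd_le : ∀ (l : List Char), (scanQuoteA l).2.length ≤ l.length := by
  intro l; induction l with
  | nil => simp [scanQuoteA]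
  | cons c r ih => by_cases h : c = '"' <;> simp [scanQuoteA, h] <;> omega

-- A's outer while loop over index i, as structural recursion over the remaining suffix s[i:].
def tokALoop : List Char → List String
  | [] => []
  | c :: rest =>
    if isWsChar c then tokALoop rest
    else if isPunctChar c then String.mk [c] :: tokALoop rest
    else if c = '"' then
      -- inner while for the quoted token, token = s[i:j+1]
      String.mk ('"' :: (scanQuoteA rest).1) :: tokALoop (scanQuoteA rest).2
    else
      -- inner while for the identifier: j advances while s[j] not a delimiter, token = s[i:j]
      String.mk (c :: rest.takeWhile (fun d => !isDelimChar d)) ::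
        tokALoop (rest.dropWhile (fun d => !isDelimChar d))
termination_by l => l.length
decreasing_by
  all_goals simp
  · have := scanQuoteA_snd_le rest; omega
  · have := rest.length_dropWhile_le (p := fun d => !isDelimChar d); omega

def tokenize_isl_schedule_py (s : String) : List String := tokALoop s.toList

-- ===== PORT B =====
-- B's single for-loop: state = (tokens so far, identifier buffer, optional quote buffer).
def runB (t : List String) (ident : List Char) (qt : Option (List Char)) : List Char → List String
  | [] =>      -- end of the for loop: final flush
    if ident ≠ [] then t ++ [String.mk ident]
    else match qt with
      | some q => t ++ [String.mk q]
      | none => t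
  | c :: rest =>
    match qt with
    | some q =>      -- inside a quoted token
      if c = '"' then runB (t ++ [String.mk (q ++ [c])]) ident none rest
      else runB t ident (some (q ++ [c])) rest
    | none =>
      if isDelimChar c then
        let t1 := if ident ≠ [] then t ++ [String.mk ident] else t   -- flush identifier
        if isPunctChar c then runB (t1 ++ [String.mk [c]]) [] none rest
        else if c = '"' then runB t1 [] (some ['"']) rest
        else runB t1 [] none rest          -- whitespace
      else runB t (ident ++ [c]) none rest -- extend identifier

def tokenize_isl_schedule_py_alt (s : String) : List String := runB [] [] none s.toList

-- ===== PRECONDITION & SPEC =====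
def Spec_tokenize_isl_schedule_py (s : String) (out : List String) : Prop := out = tokenize_isl_schedule_py_alt s
instance (s : String) (out : List String) : Decidable (Spec_tokenize_isl_schedule_py s out) := by unfold Spec_tokenize_isl_schedule_py; infer_instance

-- ===== CLAIM (what is proved, stated in full; the proofs are below) =====
def Claim_equal_tokenize_isl_schedule_py : Prop := ∀ (s : String), Dom_tokenize_isl_schedule_py s → Spec_tokenize_isl_schedule_py s (tokenize_isl_schedule_py s)

-- ===== LEMMAS AND PROOFS =====

theorem scanQuoteA_not_mem : ∀ (l : List Char), '"' ∉ l → scanQuoteA l = (l, []) := by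
  intro l; induction l with
  | nil => simp [scanQuoteA]
  | cons c r ih =>
    intro h
    simp only [List.mem_cons, not_or] at h
    have hc : c ≠ '"' := fun he => h.1 he.symm
    simp [scanQuoteA, hc, ih h.2]

theorem scanQuoteA_snd_lt : ∀ (l : List Char), '"' ∈ l → (scanQuoteA l).2.length < l.length := by
  intro l; induction l with
  | nil => simp
  | cons c r ih =>
    intro h
    by_cases hc : c = '"'
    · simp [scanQuoteA, hc]
    · simp only [List.mem_cons] at h
      rcases h with h | h
      · exact absurd h.symm hc
      · have := ih h
        simp [scanQuoteA, hc]; omega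

-- B inside a quote consumes exactly A's inner quote scan.
theorem runB_quote (l : List Char) : ∀ (t : List String) (q : List Char),
    runB t [] (some q) l =
      if '"' ∈ l then
        runB (t ++ [String.mk (q ++ (scanQuoteA l).1)]) [] none (scanQuoteA l).2
      else t ++ [String.mk (q ++ l)] := by
  induction l with
  | nil => intro t q; simp [runB]
  | cons c r ih =>
    intro t q
    by_cases hc : c = '"'
    · subst hc; simp [runB, scanQuoteA]
    · rw [show runB t [] (some q) (c :: r) = runB t [] (some (q ++ [c])) r by
            simp [runB, hc], ih]
      by_cases hm : '"' ∈ r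
      · have hm2 : '"' ∈ c :: r := List.mem_cons_of_mem _ hm
        simp [hm, hm2, scanQuoteA, hc, List.append_assoc]
      · have hm2 : '"' ∉ c :: r := by
          intro h
          rcases List.mem_cons.1 h with h | h
          · exact hc h.symm
          · exact hm h
        simp [hm, hm2, List.append_assoc]

-- B with a nonempty identifier buffer consumes exactly A's identifier scan, then flushes.
theorem runB_ident (l : List Char) : ∀ (t : List String) (b : List Char), b ≠ [] →
    runB t b none l =
      runB (t ++ [String.mk (b ++ l.takeWhile (fun d => !isDelimChar d))]) [] none
        (l.dropWhile (fun d => !isDelimChar d)) := by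
  induction l with
  | nil => intro t b hb; simp [runB, hb]
  | cons c r ih =>
    intro t b hb
    by_cases hd : isDelimChar c
    · -- both sides take one step at the delimiter to the same call
      simp only [List.takeWhile_cons, List.dropWhile_cons, hd, Bool.not_true,
        Bool.false_eq_true, if_false, List.append_nil]
      by_cases hp : isPunctChar c
      · simp [runB, hd, hp, hb, List.append_assoc]
      · by_cases hq : c = '"'
        · subst hq
          simp [runB, hb, List.append_assoc, isDelimChar, isPunctChar, isWsChar]
        · simp [runB, hd, hp, hq, hb, List.append_assoc]
    · simp only [List.takeWhile_cons, List.dropWhile_cons, hd, Bool.not_false, if_true]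
      rw [show runB t b none (c :: r) = runB t (b ++ [c]) none r by simp [runB, hd], ih t (b ++ [c]) (by simp)]
      simp [List.append_assoc]

-- Main invariant: B starting from a clean state produces exactly A's tokens.
theorem runB_main : ∀ (n : ℕ) (l : List Char), l.length ≤ n → ∀ (t : List String),
    runB t [] none l = t ++ tokALoop l := by
  intro n
  induction n with
  | zero => intro l hl t; have : l = [] := List.eq_nil_of_length_eq_zero (by omega); subst this; simp [runB, tokALoop]
  | succ n ih =>
    intro l hl t
    match l with
    | [] => simp [runB, tokALoop]
    | c :: rest =>
      simp only [List.length_cons] at hl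
      by_cases hw : isWsChar c
      · have hd : isDelimChar c := by simp [isDelimChar, hw]
        have hws : c = ' ' ∨ c = '\t' ∨ c = '\n' ∨ c = '\r' := by
          simpa [isWsChar, or_assoc] using hw
        have hp : ¬ isPunctChar c = true := by
          rcases hws with h | h | h | h <;> subst h <;> decide
        have hq : c ≠ '"' := by
          rcases hws with h | h | h | h <;> subst h <;> decide
        rw [show runB t [] none (c :: rest) = runB t [] none rest by simp [runB, hd, hp, hq]]
        rw [ih rest (by omega) t]
        simp [tokALoop, hw]
      · by_cases hp : isPunctChar c
        · have hd : isDelimChar c := by simp [isDelimChar, hp]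
          rw [show runB t [] none (c :: rest) = runB (t ++ [String.mk [c]]) [] none rest by
                simp [runB, hd, hp]]
          rw [ih rest (by omega)]
          simp [tokALoop, hw, hp]
        · by_cases hq : c = '"'
          · subst hq
            have hd : isDelimChar '"' := by decide
            rw [show runB t [] none ('"' :: rest) = runB t [] (some ['"']) rest by
                  simp [runB, hd, hp]]
            rw [runB_quote]
            by_cases hm : '"' ∈ rest
            · rw [if_pos hm, ih _ (by have := scanQuoteA_snd_lt rest hm; omega)]
              simp [tokALoop, hp, hw]
            · rw [if_neg hm]
              rw [tokALoop]
              simp [hp, hw, scanQuoteA_not_mem rest hm, tokALoop]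
          · have hd : ¬ isDelimChar c = true := by simp [isDelimChar, hw, hp, hq]
            rw [show runB t [] none (c :: rest) = runB t [c] none rest by simp [runB, hd]]
            rw [runB_ident rest t [c] (by simp)]
            rw [ih _ (by have := rest.length_dropWhile_le (p := fun d => !isDelimChar d); omega)]
            simp [tokALoop, hw, hp, hq]

-- ===== VERDICT (by name: the statement is the Claim_ definition above) =====
theorem tokenize_isl_schedule_py_spec : Claim_equal_tokenize_isl_schedule_py := by
  intro s _
  unfold Spec_tokenize_isl_schedule_py tokenize_isl_schedule_py tokenize_isl_schedule_py_alt
  rw [runB_main s.toList.length s.toList le_rfl []]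
  simp
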